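-- pv_equiv track=rewrite | github.com/Oh-SeulGi0615/Algorithm-Study | 프로그래머스/2/138476. 귤 고르기/귤 고르기.py | solution
-- ===== SOURCE A (Python) =====
-- def solution(k, tangerine):
--     dict_ = {}
--     for i in tangerine:
--         if i not in dict_:
--             dict_[i] = 1
--         else:
--             dict_[i] += 1
--
--     dict_ = sorted(dict_.items(), key=lambda x: -x[1])
--
--     box = []
--     capacity = k
--     for j in dict_:
--         if capacity > 0:
--             capacity -= j[1]
--             box.append(j[0])
--         else:
--             break
--     return len(box)
-- ===== SOURCE B (Python) =====
-- def solution(k, tangerine):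
--     # count frequency of each size
--     freq = {}
--     for t in tangerine:
--         freq[t] = freq.get(t, 0) + 1
--     # counting sort of the frequencies: buckets[c] = number of sizes occurring c times
--     buckets = {}
--     for c in freq.values():
--         buckets[c] = buckets.get(c, 0) + 1
--     cap = k
--     kinds = 0
--     for c in reversed(range(1, len(tangerine) + 1)):
--         cnt = buckets.get(c, 0)
--         while cnt > 0 and cap > 0:
--             cap -= c
--             kinds += 1
--             cnt -= 1
--     return kinds
-- ===== Notes on version B (the rewrite author's own statement) =====
-- stated objective: alternative
-- what changed: Replaces the comparison sort of (size, count) items by a counting sort of the frequencies (bucket counts indexed by frequency, scanned from the largest frequency down), so no sort and no item list is built.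
import Mathlib
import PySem

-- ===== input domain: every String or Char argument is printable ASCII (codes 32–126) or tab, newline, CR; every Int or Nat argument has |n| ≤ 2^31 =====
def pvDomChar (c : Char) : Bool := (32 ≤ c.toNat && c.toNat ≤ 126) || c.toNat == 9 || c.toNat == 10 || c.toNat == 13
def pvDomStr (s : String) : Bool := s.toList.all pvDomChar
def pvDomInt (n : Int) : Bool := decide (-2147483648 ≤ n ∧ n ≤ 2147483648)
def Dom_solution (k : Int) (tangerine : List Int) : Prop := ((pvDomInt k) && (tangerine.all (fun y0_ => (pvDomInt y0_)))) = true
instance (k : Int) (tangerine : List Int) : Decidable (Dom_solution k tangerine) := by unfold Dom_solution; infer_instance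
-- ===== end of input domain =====

-- B replaces A's comparison sort of (size, count) items by a counting sort of the frequencies
-- scanned from the largest frequency down (an alternative algorithm; both programs are total).

-- ===== PORT A =====
-- the 'for j in dict_: if capacity > 0: … else: break' loop, carrying (capacity, box)
def pvLoopA : List (Int × Int) → Int → List Int → List Int
  | [], _, box => box
  | j :: rest, cap, box =>
      if cap > 0 then pvLoopA rest (cap - j.2) (box ++ [j.1]) else box

def solution (k : Int) (tangerine : List Int) : Int :=
  let dict := tangerine.foldl
    (fun d i => if d.contains i then d.modify i 0 (· + 1) else d.insert i 1)
    PySem.Dict.empty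
  let items := PySem.List.sorted dict.items (fun x => -x.2) false
  ((pvLoopA items k []).length : Int)

-- ===== PORT B =====
-- the 'while cnt > 0 and cap > 0: cap -= c; kinds += 1; cnt -= 1' loop; returns (cap, kinds)
def pvInnerB (c : Int) (cnt cap kinds : Int) : Int × Int :=
  if h : 0 < cnt ∧ 0 < cap then pvInnerB c (cnt - 1) (cap - c) (kinds + 1)
  else (cap, kinds)
termination_by cnt.toNat
decreasing_by omega

def solution_alt (k : Int) (tangerine : List Int) : Int :=
  let freq := tangerine.foldl (fun d t => d.insert t (d.getD t 0 + 1)) PySem.Dict.empty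
  let buckets := freq.values.foldl (fun d c => d.insert c (d.getD c 0 + 1)) PySem.Dict.empty
  let st := (PySem.List.pyRange 1 ((tangerine.length : Int) + 1) 1).reverse.foldl
      (fun (st : Int × Int) c => pvInnerB c (buckets.getD c 0) st.1 st.2) (k, 0)
  st.2

-- ===== PRECONDITION & SPEC =====
def Spec_solution (k : Int) (tangerine : List Int) (out : Int) : Prop := out = solution_alt k tangerine
instance (k : Int) (tangerine : List Int) (out : Int) : Decidable (Spec_solution k tangerine out) := by unfold Spec_solution; infer_instance

-- ===== CLAIM (what is proved, stated in full; the proofs are below) =====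
def Claim_equal_solution : Prop := ∀ (k : Int) (tangerine : List Int), Dom_solution k tangerine → Spec_solution k tangerine (solution k tangerine)

-- ===== LEMMAS AND PROOFS =====

-- the common greedy step: take one group of count c if capacity is still positive
def pvF (st : Int × Int) (c : Int) : Int × Int :=
  if 0 < st.1 then (st.1 - c, st.2 + 1) else st

theorem pvF_stuck (l : List Int) (st : Int × Int) (h : st.1 ≤ 0) :
    l.foldl pvF st = st := by
  induction l with
  | nil => rfl
  | cons c cs ih => simpa [pvF, not_lt.mpr h] using ih

theorem pvLoopA_len (items : List (Int × Int)) (cap : Int) (box : List Int) :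
    ((pvLoopA items cap box).length : Int)
      = ((items.map (·.2)).foldl pvF (cap, (box.length : Int))).2 := by
  induction items generalizing cap box with
  | nil => rfl
  | cons j rest ih =>
      by_cases h : 0 < cap
      · simpa [pvLoopA, h, pvF] using ih (cap - j.2) (box ++ [j.1])
      · have h0 := not_lt.mp h
        rw [pvLoopA, if_neg h]
        simp only [List.map_cons, List.foldl_cons, pvF, if_neg h]
        rw [pvF_stuck _ (cap, (box.length : Int)) h0]

theorem pvInnerB_eq (m : Nat) (c cnt cap kinds : Int) (hm : cnt.toNat = m) :
    pvInnerB c cnt cap kinds = (List.replicate m c).foldl pvF (cap, kinds) := by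
  induction m generalizing cnt cap kinds with
  | zero =>
      rw [pvInnerB]
      have : ¬ (0 < cnt ∧ 0 < cap) := by omega
      simp [this]
  | succ n ih =>
      rw [pvInnerB]
      by_cases hcap : 0 < cap
      · have hcnt : 0 < cnt := by omega
        simp only [hcnt, hcap, and_self, dite_true, List.replicate_succ, List.foldl_cons,
          pvF]
        exact ih (cnt - 1) (cap - c) (kinds + 1) (by omega)
      · have : ¬ (0 < cnt ∧ 0 < cap) := by tauto
        simp only [this, dite_false]
        rw [pvF_stuck _ _ (by simpa using not_lt.mp hcap)]

-- counting over a nodup list of buckets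
theorem pvCount_flat {m : Int → Nat} (l : List Int) (hnd : l.Nodup) (x : Int) :
    (l.flatMap (fun c => List.replicate (m c) c)).count x
      = if x ∈ l then m x else 0 := by
  induction l with
  | nil => simp
  | cons c cs ih =>
      rcases List.nodup_cons.mp hnd with ⟨hc, hcs⟩
      by_cases hx : x = c
      · subst hx
        simp [List.count_append, ih hcs, hc]
      · simp [List.count_append, List.count_replicate, ih hcs, hx,
          Ne.symm hx]

theorem pvPairwise_flat {m : Int → Nat} (l : List Int) (hl : l.Pairwise (· > ·)) :
    (l.flatMap (fun c => List.replicate (m c) c)).Pairwise (fun a b => -a ≤ -b) := by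
  induction l with
  | nil => simp
  | cons c cs ih =>
      rcases List.pairwise_cons.mp hl with ⟨hc, hcs⟩
      simp only [List.flatMap_cons]
      rw [List.pairwise_append]
      refine ⟨?_, ih hcs, ?_⟩
      · exact List.pairwise_replicate.mpr (Or.inr (by simp))
      · intro a ha b hb
        have ha' : a = c := (List.eq_of_mem_replicate ha)
        rcases List.mem_flatMap.mp hb with ⟨c', hc', hb'⟩
        have hb'' : b = c' := List.eq_of_mem_replicate hb'
        have := hc c' hc'
        omega

-- A's dict-building loop is exactly Counter(tangerine)
theorem pvDictA_eq (tangerine : List Int) :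
    tangerine.foldl
      (fun d i => if d.contains i then d.modify i 0 (· + 1) else d.insert i 1)
      PySem.Dict.empty = PySem.Dict.counter tangerine := by
  rw [PySem.Dict.counter_eq_foldl]
  congr 1
  funext d i
  by_cases h : d.contains i
  · simp [h]
  · have h' : d.contains i = false := by simpa using h
    simp [h', PySem.Dict.modify, PySem.Dict.getD_of_not_contains _ _ h']

-- the two greedy inputs coincide: sorted-desc items' counts = counting-sort flattening
theorem pvLists_eq (tangerine : List Int) :
    ((PySem.List.sorted (PySem.Dict.counter tangerine).items (fun x => -x.2) false).map (·.2))
      = ((PySem.List.pyRange 1 ((tangerine.length : Int) + 1) 1).reverse.flatMap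
          (fun c => List.replicate (((PySem.Dict.counter tangerine).values.count c)) c)) := by
  set vals := (PySem.Dict.counter tangerine).values with hvals
  have hvals_mem : ∀ v ∈ vals, 1 ≤ v ∧ v ≤ (tangerine.length : Int) := by
    intro v hv
    have : vals = (PySem.Set.ofList tangerine).map (fun k => ((tangerine.count k : Int))) := by
      rw [hvals]
      show ((PySem.Dict.counter tangerine).items.map (·.2)) = _
      rw [PySem.Dict.items_counter]
      simp
    rw [this] at hv
    rcases List.mem_map.mp hv with ⟨x, hx, rfl⟩
    have hx' : x ∈ tangerine := by
      exact (PySem.Set.mem_ofList tangerine x).mp hx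
    constructor
    · exact_mod_cast List.count_pos_iff.mpr hx'
    · exact_mod_cast List.count_le_length
  -- permutations
  have hpermL : ((PySem.List.sorted (PySem.Dict.counter tangerine).items (fun x => -x.2) false).map (·.2)).Perm vals :=
    (PySem.List.sorted_perm _ _ _).map _
  have hpermR : ((PySem.List.pyRange 1 ((tangerine.length : Int) + 1) 1).reverse.flatMap
          (fun c => List.replicate ((vals.count c)) c)).Perm vals := by
    rw [List.perm_iff_count]
    intro a
    rw [pvCount_flat _ (by simpa using PySem.List.nodup_pyRange_one 1 _) a]
    by_cases ha : a ∈ (PySem.List.pyRange 1 ((tangerine.length : Int) + 1) 1).reverse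
    · simp [ha]
    · rw [if_neg ha]
      symm
      rw [List.count_eq_zero]
      intro hmem
      apply ha
      rw [List.mem_reverse, PySem.List.mem_pyRange_one]
      have := hvals_mem a hmem
      omega
  -- orderedness
  have hpwL : ((PySem.List.sorted (PySem.Dict.counter tangerine).items (fun x => -x.2) false).map (·.2)).Pairwise
      (fun a b => -a ≤ -b) := by
    have := PySem.List.sorted_pairwise (PySem.Dict.counter tangerine).items (fun x => -x.2)
    exact List.pairwise_map.mpr this
  have hpwR := pvPairwise_flat (m := fun c => (vals.count c))
      ((PySem.List.pyRange 1 ((tangerine.length : Int) + 1) 1).reverse)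
      (by simpa [List.pairwise_reverse] using PySem.List.pairwise_lt_pyRange_one 1 ((tangerine.length : Int) + 1))
  exact PySem.List.eq_of_perm_of_pairwise_le_of_injective (fun x : Int => -x)
    (fun a b h => by simpa using h) (hpermL.trans hpermR.symm) hpwL hpwR

-- ===== VERDICT (by name: the statement is the Claim_ definition above) =====
theorem solution_spec : Claim_equal_solution := by
  intro k tangerine _
  show solution k tangerine = solution_alt k tangerine
  unfold solution solution_alt
  simp only [pvDictA_eq, PySem.Dict.foldl_insert_getD_add_one_eq_counter]
  rw [pvLoopA_len]
  have hinner : ∀ (st : Int × Int) (c : Int),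
      pvInnerB c ((PySem.Dict.counter (PySem.Dict.counter tangerine).values).getD c 0) st.1 st.2
        = (List.replicate (((PySem.Dict.counter tangerine).values.count c)) c).foldl pvF st := by
    intro st c
    rw [PySem.Dict.getD_counter]
    exact pvInnerB_eq _ c _ st.1 st.2 (by simp)
  calc ((((PySem.List.sorted (PySem.Dict.counter tangerine).items (fun x => -x.2) false).map (·.2)).foldl pvF (k, ((0:Nat) : Int)))).2
      = (((PySem.List.pyRange 1 ((tangerine.length : Int) + 1) 1).reverse.flatMap
          (fun c => List.replicate (((PySem.Dict.counter tangerine).values.count c)) c)).foldl pvF (k, 0)).2 := by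
        rw [pvLists_eq]; norm_num
    _ = _ := by
        rw [List.foldl_flatMap]
        simp only [hinner]
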